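-- pv_equiv track=rewrite | github.com/MichaelArslangul/python_Sandbox | DP/WaysToGoUpStairs.py | nbr_of_ways
-- ===== SOURCE A (Python) =====
-- def nbr_of_ways(nbr_stairs):
--     _nways = [0]*(nbr_stairs +1)
--     _nways[0] = 0
--     _nways[1] = 1
--     _nways[2] = 2
--
--     for i in range(3, nbr_stairs+1):
--         _nways[i] = _nways[i-1] + _nways[i-2]
--     return _nways[nbr_stairs]
-- ===== SOURCE B (Python) =====
-- def nbr_of_ways(nbr_stairs):
--     # ways(n) = F(n+1) where F is the Fibonacci sequence (F(1)=F(2)=1),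
--     # computed in O(log n) arithmetic steps by fast doubling.
--     def fib_pair(k):
--         # returns (F(k), F(k+1))
--         if k == 0:
--             return (0, 1)
--         a, b = fib_pair(k >> 1)
--         c = a * (2 * b - a)
--         d = a * a + b * b
--         if k & 1:
--             return (d, c + d)
--         return (c, d)
--     return fib_pair(nbr_stairs + 1)[0]
-- ===== Notes on version B (the rewrite author's own statement) =====
-- stated objective: faster
-- what changed: Replaced the O(n) DP table loop with fast-doubling Fibonacci recursion (ways(n) = F(n+1)), computing the answer in O(log n) arithmetic steps with no table.
import Mathlib
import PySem

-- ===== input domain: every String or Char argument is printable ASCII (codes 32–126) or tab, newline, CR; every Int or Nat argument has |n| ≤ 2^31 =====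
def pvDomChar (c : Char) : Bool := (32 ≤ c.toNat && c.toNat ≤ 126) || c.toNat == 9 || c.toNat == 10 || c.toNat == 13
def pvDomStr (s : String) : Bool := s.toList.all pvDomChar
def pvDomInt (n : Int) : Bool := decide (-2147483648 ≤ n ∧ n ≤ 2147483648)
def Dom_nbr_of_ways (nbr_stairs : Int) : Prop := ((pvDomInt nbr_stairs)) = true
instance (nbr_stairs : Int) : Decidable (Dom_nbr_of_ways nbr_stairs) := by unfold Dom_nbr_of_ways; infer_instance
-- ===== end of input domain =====

-- B replaces A's O(n) DP table loop with fast-doubling Fibonacci (ways(n) = F(n+1)): O(log n) arithmetic steps.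

-- ===== PORT A =====
-- The Python list _nways is ported as a Lean Array; every index written or read is nonnegative
-- and in range under Pre_ (A raises IndexError otherwise), so setIfInBounds/getD/.toNat are exact there.
def nbr_of_ways (nbr_stairs : Int) : Int :=
  let w := Array.replicate (nbr_stairs + 1).toNat (0 : Int)   -- _nways = [0]*(nbr_stairs+1)
  let w := w.setIfInBounds 0 0                                 -- _nways[0] = 0
  let w := w.setIfInBounds 1 1                                 -- _nways[1] = 1
  let w := w.setIfInBounds 2 2                                 -- _nways[2] = 2
  let w := (PySem.List.pyRange 3 (nbr_stairs + 1) 1).foldl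
      (fun w i =>
        w.setIfInBounds i.toNat (w.getD (i - 1).toNat 0 + w.getD (i - 2).toNat 0)) w
  w.getD nbr_stairs.toNat 0                                    -- return _nways[nbr_stairs]

-- ===== PORT B =====
-- fib_pair k = (F(k), F(k+1)) by fast doubling; Python's k>>1 / k&1 are k/2 / k%2 on the
-- nonnegative arguments that occur under Pre_ (exact there; Python B does not return for nbr_stairs < -1).
def fibPair : Nat → Int × Int
  | 0 => (0, 1)
  | (k + 1) =>
    let p := fibPair ((k + 1) / 2)
    let a := p.1
    let b := p.2
    let c := a * (2 * b - a)
    let d := a * a + b * b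
    if (k + 1) % 2 = 1 then (d, c + d) else (c, d)
termination_by k => k
decreasing_by omega

def nbr_of_ways_alt (nbr_stairs : Int) : Int :=
  (fibPair (nbr_stairs + 1).toNat).1

-- ===== PRECONDITION & SPEC =====
-- Pre_: below two stairs A raises IndexError (the table [0]*(nbr_stairs+1) is too short to seed its base entries).
def Pre_nbr_of_ways (nbr_stairs : Int) : Prop := 2 ≤ nbr_stairs
instance (nbr_stairs : Int) : Decidable (Pre_nbr_of_ways nbr_stairs) := by unfold Pre_nbr_of_ways; infer_instance
def pvWitness_nbr_of_ways : Int := 5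

def Spec_nbr_of_ways (nbr_stairs : Int) (out : Int) : Prop := out = nbr_of_ways_alt nbr_stairs
instance (nbr_stairs : Int) (out : Int) : Decidable (Spec_nbr_of_ways nbr_stairs out) := by unfold Spec_nbr_of_ways; infer_instance

-- ===== CLAIM (what is proved, stated in full; the proofs are below) =====
def Claim_equal_nbr_of_ways : Prop := ∀ (nbr_stairs : Int), Dom_nbr_of_ways nbr_stairs → Pre_nbr_of_ways nbr_stairs → Spec_nbr_of_ways nbr_stairs (nbr_of_ways nbr_stairs)

-- ===== LEMMAS AND PROOFS =====

-- The sequence A's table computes: F 0 = 0, F 1 = 1, F 2 = 2, F i = F(i-1) + F(i-2).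
def Fway : Nat → Int
  | 0 => 0
  | 1 => 1
  | 2 => 2
  | (n + 3) => Fway (n + 2) + Fway (n + 1)

lemma Fway_eq_fib : ∀ n : Nat, 1 ≤ n → Fway n = (Nat.fib (n + 1) : Int) := by
  intro n
  induction n using Nat.strong_induction_on with
  | _ n ih =>
    match n with
    | 0 => intro h; omega
    | 1 => intro _; simp [Fway]
    | 2 => intro _; simp [Fway, Nat.fib]
    | (m + 3) =>
      intro _
      have h1 := ih (m + 2) (by omega) (by omega)
      have h2 := ih (m + 1) (by omega) (by omega)
      have hf : Nat.fib (m + 4) = Nat.fib (m + 2) + Nat.fib (m + 3) := by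
        rw [Nat.fib_add_two]
      simp only [Fway, h1, h2]
      push_cast [hf]
      try ring

lemma fibPair_eq : ∀ k : Nat, fibPair k = ((Nat.fib k : Int), (Nat.fib (k + 1) : Int)) := by
  intro k
  induction k using Nat.strong_induction_on with
  | _ k ih =>
    match k with
    | 0 => simp [fibPair]
    | (k + 1) =>
      rw [fibPair, ih ((k + 1) / 2) (by omega)]
      set q : Nat := (k + 1) / 2 with hq
      have hle : Nat.fib q ≤ 2 * Nat.fib (q + 1) := by
        have := Nat.fib_le_fib_succ (n := q); omega
      have heven : (Nat.fib q : Int) * (2 * (Nat.fib (q + 1) : Int) - (Nat.fib q : Int))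
          = (Nat.fib (2 * q) : Int) := by
        rw [Nat.fib_two_mul]
        push_cast [Nat.cast_sub hle]
        ring
      have hodd : (Nat.fib q : Int) * (Nat.fib q : Int)
            + (Nat.fib (q + 1) : Int) * (Nat.fib (q + 1) : Int)
          = (Nat.fib (2 * q + 1) : Int) := by
        rw [Nat.fib_two_mul_add_one]
        push_cast
        ring
      have hsum : (Nat.fib (2 * q + 2) : Int)
          = (Nat.fib (2 * q) : Int) + (Nat.fib (2 * q + 1) : Int) := by
        have h := Nat.fib_add_two (n := 2 * q)
        push_cast [h]
        ring
      rcases Nat.even_or_odd (k + 1) with he | ho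
      · obtain ⟨t, ht⟩ := he
        have hmod : ¬ ((k + 1) % 2 = 1) := by omega
        have e1 : k + 1 = 2 * q := by omega
        have e2 : k + 1 + 1 = 2 * q + 1 := by omega
        simp only [if_neg hmod, Prod.mk.injEq]
        constructor
        · rw [e1]; exact heven
        · rw [e2]; exact hodd
      · obtain ⟨t, ht⟩ := ho
        have hmod : (k + 1) % 2 = 1 := by omega
        have o1 : k + 1 = 2 * q + 1 := by omega
        have o2 : k + 1 + 1 = 2 * q + 2 := by omega
        simp only [if_pos hmod, Prod.mk.injEq]
        constructor
        · rw [o1]; exact hodd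
        · rw [o2, hsum, ← heven, ← hodd]
          try ring

-- Array.getD after Array.setIfInBounds
lemma getD_setIfInBounds (w : Array Int) (j : Nat) (v : Int) (i : Nat) (hj : j < w.size) :
    (w.setIfInBounds j v).getD i 0 = if i = j then v else w.getD i 0 := by
  simp only [Array.getD_eq_getD_getElem?, Array.getElem?_setIfInBounds]
  by_cases h : i = j
  · subst h
    simp [hj]
  · simp [h, Ne.symm h]

-- A's loop invariant: folding the update over range j..b fills the table with Fway.
lemma loopA (b : Int) : ∀ (j : Int) (w : Array Int), 3 ≤ j → j ≤ b → b ≤ (w.size : Int) →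
    (∀ i : Nat, (i : Int) < j → w.getD i 0 = Fway i) →
    (((PySem.List.pyRange j b 1).foldl
        (fun w i =>
          w.setIfInBounds i.toNat (w.getD (i - 1).toNat 0 + w.getD (i - 2).toNat 0)) w).size
      = w.size
    ∧ ∀ i : Nat, (i : Int) < b →
      ((PySem.List.pyRange j b 1).foldl
        (fun w i =>
          w.setIfInBounds i.toNat (w.getD (i - 1).toNat 0 + w.getD (i - 2).toNat 0)) w).getD i 0
        = Fway i) := by
  intro j w h3 hjb hlen hinv
  by_cases hlt : j < b
  · have hfuel : (b - (j + 1)).toNat < (b - j).toNat := by omega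
    rw [PySem.List.pyRange_one_cons hlt, List.foldl_cons]
    set jn : Nat := j.toNat with hjn
    have hjlen : jn < w.size := by omega
    have hv1 : w.getD (j - 1).toNat 0 = Fway (jn - 1) := by
      have hc : (j - 1).toNat = jn - 1 := by omega
      rw [hc]
      exact hinv (jn - 1) (by omega)
    have hv2 : w.getD (j - 2).toNat 0 = Fway (jn - 2) := by
      have hc : (j - 2).toNat = jn - 2 := by omega
      rw [hc]
      exact hinv (jn - 2) (by omega)
    have hset : w.setIfInBounds j.toNat (w.getD (j - 1).toNat 0 + w.getD (j - 2).toNat 0)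
        = w.setIfInBounds jn (Fway (jn - 1) + Fway (jn - 2)) := by
      rw [hv1, hv2]
    rw [hset]
    have hFj : Fway jn = Fway (jn - 1) + Fway (jn - 2) := by
      obtain ⟨m, hm⟩ : ∃ m, jn = m + 3 := ⟨jn - 3, by omega⟩
      rw [hm]
      show Fway (m + 3) = Fway (m + 3 - 1) + Fway (m + 3 - 2)
      have ha : m + 3 - 1 = m + 2 := by omega
      have hb : m + 3 - 2 = m + 1 := by omega
      rw [ha, hb]
      rfl
    have ih := loopA b (j + 1) (w.setIfInBounds jn (Fway (jn - 1) + Fway (jn - 2)))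
      (by omega) (by omega) (by simpa using hlen)
      (by
        intro i hi
        rw [getD_setIfInBounds _ _ _ _ hjlen]
        split_ifs with h
        · subst h; exact hFj.symm
        · exact hinv i (by omega))
    simpa using ih
  · rw [PySem.List.pyRange_one_eq_nil (by omega)]
    exact ⟨rfl, fun i hi => hinv i (by omega)⟩
termination_by j => (b - j).toNat
decreasing_by omega

lemma nbr_of_ways_eq_Fway (n : Int) (hn : 2 ≤ n) : nbr_of_ways n = Fway n.toNat := by
  unfold nbr_of_ways
  set W3 : Array Int :=
    (((Array.replicate (n + 1).toNat (0 : Int)).setIfInBounds 0 0).setIfInBounds 1 1).setIfInBounds 2 2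
    with hW3
  have hsize : W3.size = (n + 1).toNat := by simp [hW3]
  have hinv : ∀ i : Nat, (i : Int) < 3 → W3.getD i 0 = Fway i := by
    intro i hi
    have hi' : i < 3 := by omega
    rw [hW3]
    rw [getD_setIfInBounds _ _ _ _ (by simp; omega)]
    rw [getD_setIfInBounds _ _ _ _ (by simp; omega)]
    rw [getD_setIfInBounds _ _ _ _ (by simp; omega)]
    interval_cases i <;> simp [Fway]
  have hmain := loopA (n + 1) 3 W3 (by omega) (by omega) (by omega) hinv
  exact hmain.2 n.toNat (by omega)

lemma alt_eq_fib (n : Int) (hn : 0 ≤ n) :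
    nbr_of_ways_alt n = (Nat.fib (n.toNat + 1) : Int) := by
  unfold nbr_of_ways_alt
  rw [fibPair_eq]
  have h : (n + 1).toNat = n.toNat + 1 := by omega
  rw [h]

-- ===== VERDICT (by name: the statement is the Claim_ definition above) =====
theorem nbr_of_ways_spec : Claim_equal_nbr_of_ways := by
  intro n _ hpre
  have hn : 2 ≤ n := hpre
  unfold Spec_nbr_of_ways
  rw [nbr_of_ways_eq_Fway n hn, alt_eq_fib n (by omega)]
  exact Fway_eq_fib n.toNat (by omega)
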